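-- pv_equiv track=rewrite | github.com/4mritz/multi-object-tracking-system | metrics/mot_metrics.py | compute_id_switches
-- ===== SOURCE A (Python) =====
-- def compute_id_switches(assignments):
--     switches = 0
--
--     for obj_id, history in assignments.items():
--         prev = None
--         for t in history:
--             if prev is not None and t != prev:
--                 switches += 1
--             prev = t
--
--     return switches
-- ===== SOURCE B (Python) =====
-- def compute_id_switches(assignments):
--     total = 0
--     for history in assignments.values():
--         runs = []
--         for t in history:
--             if not runs or runs[-1] != t:
--                 runs.append(t)
--         total += sum(1 for k in runs[:-1] if k is not None)
--     return total
-- ===== Notes on version B (the rewrite author's own statement) =====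
-- stated objective: alternative
-- what changed: B collapses each history into a list of runs of consecutive equal ids, then counts the non-None run leaders before the last run, instead of A's prev-sentinel adjacent-comparison pass.
import Mathlib
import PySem

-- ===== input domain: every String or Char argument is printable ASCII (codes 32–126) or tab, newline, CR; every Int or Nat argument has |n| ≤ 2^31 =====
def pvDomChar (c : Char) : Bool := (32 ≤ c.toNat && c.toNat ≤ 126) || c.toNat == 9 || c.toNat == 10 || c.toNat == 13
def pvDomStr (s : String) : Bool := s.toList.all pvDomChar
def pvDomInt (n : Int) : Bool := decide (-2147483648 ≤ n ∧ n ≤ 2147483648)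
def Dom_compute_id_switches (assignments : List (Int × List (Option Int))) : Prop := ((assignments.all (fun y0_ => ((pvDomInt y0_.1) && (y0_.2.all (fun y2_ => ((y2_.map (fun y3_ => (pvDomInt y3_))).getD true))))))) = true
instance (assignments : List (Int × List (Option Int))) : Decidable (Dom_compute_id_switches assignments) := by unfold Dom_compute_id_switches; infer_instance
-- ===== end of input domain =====

-- B collapses each history into its runs of consecutive equal ids and counts non-None run
-- leaders before the last run; a different decomposition of the same count, same cost as A.

-- ===== PORT A =====
-- A: for each history, a prev sentinel (starts None) and a count of positions where
-- prev is not None and t != prev; prev := t each step.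
def compute_id_switches (assignments : List (Int × List (Option Int))) : Int :=
  assignments.foldl (fun switches p =>
    (p.2.foldl (fun (s : Int × Option Int) t =>
      ((if s.2 ≠ none ∧ t ≠ s.2 then s.1 + 1 else s.1), t)) (switches, none)).1) 0

-- ===== PORT B =====
-- B helper: collapse a history into its list of runs (one element per maximal run).
def pvRuns (history : List (Option Int)) : List (Option Int) :=
  history.foldl (fun runs t => if runs = [] ∨ runs.getLast? ≠ some t then runs ++ [t] else runs) []

def compute_id_switches_alt (assignments : List (Int × List (Option Int))) : Int :=
  assignments.foldl (fun total p =>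
    total + (((pvRuns p.2).dropLast).countP (fun k => k ≠ none) : Int)) 0

-- ===== PRECONDITION & SPEC =====
def Spec_compute_id_switches (assignments : List (Int × List (Option Int))) (out : Int) : Prop := out = compute_id_switches_alt assignments
instance (assignments : List (Int × List (Option Int))) (out : Int) : Decidable (Spec_compute_id_switches assignments out) := by unfold Spec_compute_id_switches; infer_instance

-- ===== CLAIM (what is proved, stated in full; the proofs are below) =====
def Claim_equal_compute_id_switches : Prop := ∀ (assignments : List (Int × List (Option Int))), Dom_compute_id_switches assignments → Spec_compute_id_switches assignments (compute_id_switches assignments)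

-- ===== LEMMAS AND PROOFS =====

-- reference count: switches in a history given the previous element
def pvSwitch (prev : Option Int) : List (Option Int) → Int
  | [] => 0
  | t :: rest => (if prev ≠ none ∧ t ≠ prev then 1 else 0) + pvSwitch t rest

def pvCount (runs : List (Option Int)) : Int :=
  ((runs.dropLast).countP (fun k => k ≠ none) : Int)

-- A's inner fold computes s + pvSwitch prev h
theorem pvA_inner (h : List (Option Int)) : ∀ (s : Int) (prev : Option Int),
    (h.foldl (fun (s : Int × Option Int) t =>
      ((if s.2 ≠ none ∧ t ≠ s.2 then s.1 + 1 else s.1), t)) (s, prev)).1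
      = s + pvSwitch prev h := by
  induction h with
  | nil => intro s prev; simp [pvSwitch]
  | cons t rest ih =>
    intro s prev
    simp only [List.foldl_cons, pvSwitch, ih]
    split_ifs <;> ring

theorem pvCount_append (runs : List (Option Int)) (p t : Option Int)
    (hl : runs.getLast? = some p) :
    pvCount (runs ++ [t]) = pvCount runs + (if p ≠ none then 1 else 0) := by
  have hne : runs ≠ [] := by rintro rfl; simp at hl
  obtain ⟨init, q, rfl⟩ := (List.eq_nil_or_concat runs).resolve_left hne
  have hq : q = p := by simpa using hl
  subst hq
  simp [pvCount, List.countP_append, List.countP_cons]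

-- B's run fold from a nonempty accumulator
theorem pvB_inner (h : List (Option Int)) : ∀ (runs : List (Option Int)) (p : Option Int),
    runs.getLast? = some p →
    pvCount (h.foldl (fun runs t => if runs = [] ∨ runs.getLast? ≠ some t then runs ++ [t] else runs) runs)
      = pvCount runs + pvSwitch p h := by
  induction h with
  | nil => intro runs p _; simp [pvSwitch]
  | cons t rest ih =>
    intro runs p hl
    have hne : runs ≠ [] := by rintro rfl; simp at hl
    simp only [List.foldl_cons]
    by_cases ht : p = t
    · subst ht
      rw [if_neg (by simp [hne, hl])]
      rw [ih runs p hl]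
      simp [pvSwitch]
    · rw [if_pos (by right; intro hc; rw [hl] at hc; exact ht (Option.some.inj hc))]
      rw [ih (runs ++ [t]) t (by simp)]
      rw [pvCount_append runs p t hl]
      simp only [pvSwitch]
      have htp : (t ≠ p) := fun e => ht e.symm
      split_ifs with h1 h2 <;> simp_all <;> ring

-- per-history: B's count equals the switch count from prev = none
theorem pvB_history (h : List (Option Int)) :
    pvCount (pvRuns h) = pvSwitch none h := by
  cases h with
  | nil => simp [pvRuns, pvCount, pvSwitch]
  | cons t rest =>
    simp only [pvRuns, List.foldl_cons]
    rw [if_pos (by left; trivial)]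
    simp only [List.nil_append]
    rw [pvB_inner rest [t] t (by simp)]
    simp [pvCount, pvSwitch]

theorem pvA_outer (l : List (Int × List (Option Int))) : ∀ (acc : Int),
    l.foldl (fun switches p =>
      (p.2.foldl (fun (s : Int × Option Int) t =>
        ((if s.2 ≠ none ∧ t ≠ s.2 then s.1 + 1 else s.1), t)) (switches, none)).1) acc
    = l.foldl (fun s p => s + pvSwitch none p.2) acc := by
  induction l with
  | nil => intro acc; rfl
  | cons p rest ih =>
    intro acc
    simp only [List.foldl_cons, pvA_inner]

theorem pvB_outer (l : List (Int × List (Option Int))) : ∀ (acc : Int),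
    l.foldl (fun total p =>
        total + (((pvRuns p.2).dropLast).countP (fun k => k ≠ none) : Int)) acc
    = l.foldl (fun s p => s + pvSwitch none p.2) acc := by
  induction l with
  | nil => intro acc; rfl
  | cons p rest ih =>
    intro acc
    have hb := pvB_history p.2
    simp only [pvCount] at hb
    simp only [List.foldl_cons, hb]
    exact ih _

-- ===== VERDICT (by name: the statement is the Claim_ definition above) =====
theorem compute_id_switches_spec : Claim_equal_compute_id_switches := by
  intro assignments _
  unfold Spec_compute_id_switches compute_id_switches compute_id_switches_alt
  rw [pvA_outer, pvB_outer]
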